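-- pv_equiv track=rewrite | github.com/Rakoon02/Trabajo-Practico-Mensajes-secretos | TP2_SantiDom.py | cifrado_atbash
-- ===== SOURCE A (Python) =====
-- def cifrado_atbash(texto):
--     #Cifra o descifra un mensaje usando el cifrado Atbash.
--     """
--     >>> cifrado_atbash("Hola Mundo")
--     'sLOZ nFMWL'
--     >>> cifrado_atbash("abcXYZ")
--     'ZYXcba'
--     >>> cifrado_atbash("12345")
--     '87654'
--     >>> cifrado_atbash("a1b2c3")
--     'Z8Y7X6'
--     >>> cifrado_atbash("Python!")
--     'kBGSLM!'
--     >>> cifrado_atbash("Cesar 2025")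
--     'xVHZI 7974'
--     >>> cifrado_atbash("Prueba #1")
--     'kIFVYZ #8'
--     >>> cifrado_atbash("Zz9")
--     'aA0'
--     >>> cifrado_atbash("Español")
--     'vHKZñLO'
--     >>> cifrado_atbash("OpenAI 2025")
--     'lKVMzr 7974'
--     """
--     resultado = ""
--     for char in texto:
--         if 'A' <= char <= 'Z':
--             nuevo = chr(ord('Z') - (ord(char) - ord('A')))
--             resultado += nuevo.lower()
--         elif 'a' <= char <= 'z':
--             nuevo = chr(ord('z') - (ord(char) - ord('a')))
--             resultado += nuevo.upper()
--         elif '0' <= char <= '9':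
--             nuevo = chr(ord('9') - (ord(char) - ord('0')))
--             resultado += nuevo
--         else:
--             resultado += char
--     return resultado
-- ===== SOURCE B (Python) =====
-- _UPP = ''.join(chr(c) for c in range(ord('A'), ord('Z') + 1))
-- _LOW = ''.join(chr(c) for c in range(ord('a'), ord('z') + 1))
-- _DIG = ''.join(chr(c) for c in range(ord('0'), ord('9') + 1))
-- _TABLE = str.maketrans(
--     _UPP + _LOW + _DIG,
--     _UPP[::-1].lower() + _LOW[::-1].upper() + _DIG[::-1])
--
-- def cifrado_atbash(texto):
--     return texto.translate(_TABLE)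
-- ===== Notes on version B (the rewrite author's own statement) =====
-- stated objective: idiomatic
-- what changed: Replaces the per-character if/elif range arithmetic and string concatenation with a 62-entry translation table built once via str.maketrans and a single texto.translate pass.
import Mathlib
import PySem

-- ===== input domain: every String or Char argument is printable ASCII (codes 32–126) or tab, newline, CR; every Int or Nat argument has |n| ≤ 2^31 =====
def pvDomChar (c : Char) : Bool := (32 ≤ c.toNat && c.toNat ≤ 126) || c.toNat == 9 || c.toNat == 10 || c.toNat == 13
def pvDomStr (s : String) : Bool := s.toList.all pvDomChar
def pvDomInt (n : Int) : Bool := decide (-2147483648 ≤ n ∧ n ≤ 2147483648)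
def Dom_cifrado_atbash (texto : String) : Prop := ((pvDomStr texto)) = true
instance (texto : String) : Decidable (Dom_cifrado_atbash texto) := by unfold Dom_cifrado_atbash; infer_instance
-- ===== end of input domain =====

-- B replaces A's per-character if/elif arithmetic by one precomputed 62-entry translation
-- table (str.maketrans) applied in a single translate pass; objective: idiomatic.

-- ===== PORT A =====
def cifrado_atbash (texto : String) : String :=
  texto.toList.foldl (fun resultado char =>
    if 'A' ≤ char ∧ char ≤ 'Z' then
      let nuevo := Char.ofNat ('Z'.toNat - (char.toNat - 'A'.toNat))
      resultado ++ PySem.Str.lower (String.ofList [nuevo])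
    else if 'a' ≤ char ∧ char ≤ 'z' then
      let nuevo := Char.ofNat ('z'.toNat - (char.toNat - 'a'.toNat))
      resultado ++ PySem.Str.upper (String.ofList [nuevo])
    else if '0' ≤ char ∧ char ≤ '9' then
      let nuevo := Char.ofNat ('9'.toNat - (char.toNat - '0'.toNat))
      resultado ++ String.ofList [nuevo]
    else
      resultado ++ String.ofList [char]) ""

-- ===== PORT B =====
def pvUpp : List Char := (List.range 26).map (fun i => Char.ofNat ('A'.toNat + i))
def pvLow : List Char := (List.range 26).map (fun i => Char.ofNat ('a'.toNat + i))
def pvDig : List Char := (List.range 10).map (fun i => Char.ofNat ('0'.toNat + i))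

def pvTable : PySem.Dict Char Char :=
  PySem.Dict.ofList
    ((pvUpp ++ pvLow ++ pvDig).zip
      (PySem.Chars.lower pvUpp.reverse ++ PySem.Chars.upper pvLow.reverse ++ pvDig.reverse))

def cifrado_atbash_alt (texto : String) : String :=
  String.ofList (texto.toList.map (fun c => (pvTable.get? c).getD c))

-- ===== PRECONDITION & SPEC =====
def Spec_cifrado_atbash (texto : String) (out : String) : Prop := out = cifrado_atbash_alt texto
instance (texto : String) (out : String) : Decidable (Spec_cifrado_atbash texto out) := by unfold Spec_cifrado_atbash; infer_instance

-- ===== CLAIM (what is proved, stated in full; the proofs are below) =====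
def Claim_equal_cifrado_atbash : Prop := ∀ (texto : String), Dom_cifrado_atbash texto → Spec_cifrado_atbash texto (cifrado_atbash texto)

-- ===== LEMMAS AND PROOFS =====

-- A's per-character contribution, named for the proofs
def pvGA (char : Char) : String :=
  if 'A' ≤ char ∧ char ≤ 'Z' then
    PySem.Str.lower (String.ofList [Char.ofNat ('Z'.toNat - (char.toNat - 'A'.toNat))])
  else if 'a' ≤ char ∧ char ≤ 'z' then
    PySem.Str.upper (String.ofList [Char.ofNat ('z'.toNat - (char.toNat - 'a'.toNat))])
  else if '0' ≤ char ∧ char ≤ '9' then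
    String.ofList [Char.ofNat ('9'.toNat - (char.toNat - '0'.toNat))]
  else
    String.ofList [char]

def pvGB (c : Char) : Char := (pvTable.get? c).getD c

set_option maxRecDepth 4000 in
lemma pvChar_eq (c : Char) (h : pvDomChar c = true) : pvGA c = String.ofList [pvGB c] := by
  have hlt : c.toNat < 127 := by
    simp [pvDomChar] at h
    omega
  have hall : ∀ n < 127, pvGA (Char.ofNat n) = String.ofList [pvGB (Char.ofNat n)] := by decide
  have := hall c.toNat hlt
  rwa [Char.ofNat_toNat] at this

lemma pvFold_eq (l : List Char) (h : ∀ c ∈ l, pvDomChar c = true) (s : String) :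
    l.foldl (fun resultado char =>
      if 'A' ≤ char ∧ char ≤ 'Z' then
        let nuevo := Char.ofNat ('Z'.toNat - (char.toNat - 'A'.toNat))
        resultado ++ PySem.Str.lower (String.ofList [nuevo])
      else if 'a' ≤ char ∧ char ≤ 'z' then
        let nuevo := Char.ofNat ('z'.toNat - (char.toNat - 'a'.toNat))
        resultado ++ PySem.Str.upper (String.ofList [nuevo])
      else if '0' ≤ char ∧ char ≤ '9' then
        let nuevo := Char.ofNat ('9'.toNat - (char.toNat - '0'.toNat))
        resultado ++ String.ofList [nuevo]
      else
        resultado ++ String.ofList [char]) s = s ++ String.ofList (l.map pvGB) := by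
  induction l generalizing s with
  | nil => simp [String.ofList_nil]
  | cons c t ih =>
    have hc := h c (List.mem_cons_self ..)
    have step : (if 'A' ≤ c ∧ c ≤ 'Z' then
        s ++ PySem.Str.lower (String.ofList [Char.ofNat ('Z'.toNat - (c.toNat - 'A'.toNat))])
      else if 'a' ≤ c ∧ c ≤ 'z' then
        s ++ PySem.Str.upper (String.ofList [Char.ofNat ('z'.toNat - (c.toNat - 'a'.toNat))])
      else if '0' ≤ c ∧ c ≤ '9' then
        s ++ String.ofList [Char.ofNat ('9'.toNat - (c.toNat - '0'.toNat))]
      else s ++ String.ofList [c]) = s ++ pvGA c := by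
      unfold pvGA; split_ifs <;> rfl
    simp only [List.foldl_cons, List.map_cons]
    rw [step, ih (fun x hx => h x (List.mem_cons_of_mem _ hx)), pvChar_eq c hc]
    apply String.ext
    simp [String.toList_ofList, String.append_assoc]

-- ===== VERDICT (by name: the statement is the Claim_ definition above) =====
theorem cifrado_atbash_spec : Claim_equal_cifrado_atbash := by
  intro texto hdom
  unfold Spec_cifrado_atbash cifrado_atbash cifrado_atbash_alt
  have h : ∀ c ∈ texto.toList, pvDomChar c = true := by
    simpa [Dom_cifrado_atbash, pvDomStr, List.all_eq_true] using hdom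
  rw [pvFold_eq texto.toList h ""]
  apply String.ext
  simp [String.toList_ofList, pvGB]
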